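-- pv_equiv track=rewrite | github.com/opitt/advent-of-code-2023 | day15/day15-1.py | solve
-- ===== SOURCE A (Python) =====
-- def solve(lines):
--
--     def hash_it(s):
--         # Determine the ASCII code for the current character of the string.
--         # Increase the current value by the ASCII code you just determined.
--         # Set the current value to itself multiplied by 17.
--         # Set the current value to the remainder of dividing itself by 256.
--         current_value=0
--         for c in s:
--             current_value+=ord(c)
--             current_value*=17
--             current_value=current_value%256
--         return current_value
--
--     #rn=1,cm-,qp=3,cm=2,qp-,pc=4,ot=9,ab=5,pc-,pc=6,ot=7
--     sequences = lines[0].split(",")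
--     hashes = [hash_it(s) for s in sequences]
--     return sum(hashes)
-- ===== SOURCE B (Python) =====
-- def solve(lines):
--     def hash_it(s):
--         n = len(s)
--         return sum(ord(c) * pow(17, n - i, 256) for i, c in enumerate(s)) % 256
--     return sum(hash_it(s) for s in lines[0].split(","))
-- ===== Notes on version B (the rewrite author's own statement) =====
-- stated objective: alternative
-- what changed: The iterative HASH fold (running accumulator updated per character) is replaced by a closed-form polynomial hash: each character contributes ord(c)*pow(17, n-i, 256) independently and the terms are summed and reduced mod 256.
import Mathlib
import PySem

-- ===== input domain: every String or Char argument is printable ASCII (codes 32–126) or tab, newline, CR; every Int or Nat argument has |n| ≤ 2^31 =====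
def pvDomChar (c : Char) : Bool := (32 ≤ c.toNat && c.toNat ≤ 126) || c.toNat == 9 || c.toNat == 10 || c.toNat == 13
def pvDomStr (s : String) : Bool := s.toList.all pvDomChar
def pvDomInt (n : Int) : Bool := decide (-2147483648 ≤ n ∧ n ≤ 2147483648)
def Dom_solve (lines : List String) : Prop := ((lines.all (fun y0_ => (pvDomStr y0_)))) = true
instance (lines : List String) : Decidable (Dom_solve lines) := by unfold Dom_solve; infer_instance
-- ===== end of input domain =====

-- B replaces A's running left-fold accumulator with a closed-form polynomial hash (per-character
-- pow(17, n-i, 256) terms summed independently, then reduced mod 256): objective 'alternative'.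

-- ===== PORT A =====
-- hash_it: current_value += ord(c); *= 17; %= 256, folded left over the characters
def hashIt (s : List Char) : Int :=
  s.foldl (fun cv c => PySem.Int.mod ((cv + (c.toNat : Int)) * 17) 256) 0

def solve (lines : List String) : Int :=
  -- lines[0] : IndexError on [] is excluded by Pre_solve; pyGetD is exact under it
  let sequences := PySem.Chars.splitOn (PySem.List.pyGetD lines 0 "").toList [',']
  ((sequences.map (fun s => hashIt s)).sum)

-- ===== PORT B =====
-- sum(ord(c) * pow(17, n - i, 256) for i, c in enumerate(s)) % 256
-- the exponent n - i is ≥ 1 for every enumerated i, so the .toNat on it is exact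
def hashItAlt (s : List Char) : Int :=
  let n : Int := PySem.List.len s
  PySem.Int.mod (((PySem.List.enumerate s).map
    (fun p => (p.2.toNat : Int) * PySem.Int.powMod 17 (n - p.1).toNat 256)).sum) 256

def solve_alt (lines : List String) : Int :=
  ((PySem.Chars.splitOn (PySem.List.pyGetD lines 0 "").toList [',']).map
    (fun s => hashItAlt s)).sum

-- ===== PRECONDITION & SPEC =====
-- Pre_ excludes only the empty list, on which A's 'lines[0]' raises IndexError
def Pre_solve (lines : List String) : Prop := lines ≠ []
instance (lines : List String) : Decidable (Pre_solve lines) := by unfold Pre_solve; infer_instance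

def pvWitness_solve : List String := ["rn=1,cm-,qp=3"]

def Spec_solve (lines : List String) (out : Int) : Prop := out = solve_alt lines
instance (lines : List String) (out : Int) : Decidable (Spec_solve lines out) := by unfold Spec_solve; infer_instance

-- ===== CLAIM (what is proved, stated in full; the proofs are below) =====
def Claim_equal_solve : Prop := ∀ (lines : List String), Dom_solve lines → Pre_solve lines → Spec_solve lines (solve lines)

-- ===== LEMMAS AND PROOFS =====

-- The common closed form: pvP [c0,…,c_{n-1}] = Σ ord(c_i) · 17^(n-i)  (exponents n down to 1)
def pvP : List Char → Int
  | [] => 0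
  | c :: cs => (c.toNat : Int) * 17 ^ (cs.length + 1) + pvP cs

lemma pvFoldA : ∀ (cs : List Char) (c : Char) (cv : Int),
    List.foldl (fun cv c => PySem.Int.mod ((cv + (c.toNat : Int)) * 17) 256) cv (c :: cs)
      = (cv * 17 ^ (cs.length + 1) + pvP (c :: cs)) % 256 := by
  intro cs
  induction cs with
  | nil =>
    intro c cv
    simp [pvP]
    congr 1; ring
  | cons c' cs' ih =>
    intro c cv
    have step : List.foldl (fun cv c => PySem.Int.mod ((cv + (c.toNat : Int)) * 17) 256) cv
        (c :: c' :: cs')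
        = List.foldl (fun cv c => PySem.Int.mod ((cv + (c.toNat : Int)) * 17) 256)
            (PySem.Int.mod ((cv + (c.toNat : Int)) * 17) 256) (c' :: cs') := rfl
    rw [step, ih]
    rw [PySem.Int.mod_eq_emod_of_pos (by norm_num : (0:Int) < 256)]
    have h1 : ((cv + (c.toNat : Int)) * 17) % 256 ≡ (cv + (c.toNat : Int)) * 17 [ZMOD 256] :=
      Int.emod_emod_of_dvd _ dvd_rfl
    have h2 := (h1.mul_right (17 ^ (cs'.length + 1))).add_right (pvP (c' :: cs'))
    rw [h2]
    show _ = (cv * 17 ^ ((c' :: cs').length + 1) + pvP (c :: c' :: cs')) % 256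
    simp only [pvP, List.length_cons]
    congr 1; ring

lemma pvFoldB : ∀ (cs : List Char) (s n : Int), 0 ≤ s → n = s + cs.length →
    ((PySem.List.enumerate cs s).map
        (fun p => (p.2.toNat : Int) * PySem.Int.powMod 17 (n - p.1).toNat 256)).sum % 256
      = pvP cs % 256 := by
  intro cs
  induction cs with
  | nil => intro s n _ _; simp [PySem.List.enumerate_nil, pvP]
  | cons c cs ih =>
    intro s n hs hn
    rw [PySem.List.enumerate_cons]
    simp only [List.map_cons, List.sum_cons]
    have hexp : (n - s).toNat = cs.length + 1 := by
      simp only [List.length_cons] at hn; omega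
    rw [hexp, PySem.Int.powMod_eq_emod _ _ (by norm_num : (0:Int) < 256)]
    have h0 : (17:Int) ^ (cs.length + 1) % 256 ≡ 17 ^ (cs.length + 1) [ZMOD 256] :=
      Int.emod_emod_of_dvd _ dvd_rfl
    have h1 := Int.ModEq.mul_left (c.toNat : Int) h0
    have h2 : ((PySem.List.enumerate cs (s + 1)).map
        (fun p => (p.2.toNat : Int) * PySem.Int.powMod 17 (n - p.1).toNat 256)).sum
        ≡ pvP cs [ZMOD 256] := by
      have := ih (s + 1) n (by omega) (by simp only [List.length_cons] at hn; omega)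
      exact this
    have := h1.add h2
    rw [this]
    rfl

lemma pvHashEq (cs : List Char) : hashIt cs = hashItAlt cs := by
  cases cs with
  | nil => rfl
  | cons c cs =>
    unfold hashIt hashItAlt
    rw [pvFoldA cs c 0]
    simp only [PySem.List.len_eq]
    rw [PySem.Int.mod_eq_emod_of_pos (by norm_num : (0:Int) < 256)]
    rw [pvFoldB (c :: cs) 0 ((c :: cs).length) (by omega) (by omega)]
    congr 1
    simp [pvP]

-- ===== VERDICT (by name: the statement is the Claim_ definition above) =====
theorem solve_spec : Claim_equal_solve := by
  intro lines _ _
  show solve lines = solve_alt lines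
  simp [solve, solve_alt, pvHashEq]
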